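-- pv_equiv track=rewrite | github.com/DanielUH2019/cord19-ann | scripts/agreement.py | overlap_spans
-- ===== SOURCE A (Python) =====
-- def overlap_spans(spans1, spans2):
--     """
--     >>> overlap_spans([ (2,8) ], [ (4,10) ])
--     (4, 8)
--     >>> overlap_spans([ (2,8) ], [ (8,10) ])
--     (0, 8)
--     >>> overlap_spans([ (2,8), (8,10) ], [ (8,10) ])
--     (2, 8)
--     >>> overlap_spans([ (2,8), (9,10) ], [ (8,10) ])
--     (1, 8)
--     """
--
--     tags = [0, 0] * len(spans1) + [1, 1] * len(spans2)
--     spans = [x for span in spans1 + spans2 for x in span]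
--
--     state = [False, False]
--     last = 0
--     union = 0
--     intersection = 0
--
--     for span, tag in sorted(zip(spans, tags)):
--         delta = span - last
--         if all(state):
--             intersection += delta
--         if any(state):
--             union += delta
--         last = span
--         state[tag] ^= True  # same as: state[tag] = not state[tag]
--
--     return intersection, union
-- ===== SOURCE B (Python) =====
-- def overlap_spans(spans1, spans2):
--     # Parity-covered length of a span set = sum of gaps between consecutive
--     # pairs of its sorted flattened endpoints; the symmetric difference of the
--     # two covered sets is the parity coverage of the combined endpoint multiset,
--     # so intersection = (t1 + t2 - td) // 2 and union = (t1 + t2 + td) // 2.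
--     def pairsum(spans):
--         pts = sorted(p for sp in spans for p in sp)
--         return sum(pts[i + 1] - pts[i] for i in range(0, len(pts), 2))
--     t1 = pairsum(spans1)
--     t2 = pairsum(spans2)
--     td = pairsum(spans1 + spans2)
--     return (t1 + t2 - td) // 2, (t1 + t2 + td) // 2
-- ===== Notes on version B (the rewrite author's own statement) =====
-- stated objective: simpler
-- what changed: Replaces the tagged-event sweep with a two-bit parity state by three independent endpoint sorts and pair-sums, using intersection = (t1+t2-td)/2 and union = (t1+t2+td)/2 where td is the parity-covered length of the combined endpoint multiset (the symmetric difference).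
import Mathlib
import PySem

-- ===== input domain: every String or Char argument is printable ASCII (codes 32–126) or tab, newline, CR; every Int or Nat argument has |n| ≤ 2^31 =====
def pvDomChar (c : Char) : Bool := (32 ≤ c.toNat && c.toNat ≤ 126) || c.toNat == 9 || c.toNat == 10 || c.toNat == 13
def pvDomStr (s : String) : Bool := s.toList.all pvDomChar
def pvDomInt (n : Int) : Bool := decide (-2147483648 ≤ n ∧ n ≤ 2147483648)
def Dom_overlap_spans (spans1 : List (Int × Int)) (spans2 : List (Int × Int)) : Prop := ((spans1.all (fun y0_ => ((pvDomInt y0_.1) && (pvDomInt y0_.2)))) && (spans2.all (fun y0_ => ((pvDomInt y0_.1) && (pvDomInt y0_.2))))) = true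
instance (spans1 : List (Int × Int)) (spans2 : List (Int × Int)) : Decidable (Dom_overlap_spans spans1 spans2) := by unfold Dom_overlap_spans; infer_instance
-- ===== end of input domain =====

-- B replaces A's tagged-event sweep with a two-bit parity state by three endpoint
-- sorts and pair-sums combined as intersection = (t1+t2-td)//2, union = (t1+t2+td)//2
-- (objective: simpler).

-- ===== PORT A =====
-- loop body of A's `for span, tag in sorted(zip(spans, tags))`; the two-element Python
-- list `state = [False, False]` is ported as a pair of booleans, and `state[tag] ^= True`
-- toggles the component selected by the tag (tags are 0 or 1 by construction below).
def pvStep (st : (Bool × Bool) × Int × Int × Int) (ev : Int × Int) : (Bool × Bool) × Int × Int × Int :=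
  match st with
  | (state, last, union, inter) =>
    let delta := ev.1 - last
    let inter' := if state.1 && state.2 then inter + delta else inter
    let union' := if state.1 || state.2 then union + delta else union
    let state' := if ev.2 == 0 then (!state.1, state.2) else (state.1, !state.2)
    (state', ev.1, union', inter')

def overlap_spans (spans1 : List (Int × Int)) (spans2 : List (Int × Int)) : Int × Int :=
  let tags : List Int :=
    PySem.List.pyRepeat [0, 0] (spans1.length : Int) ++ PySem.List.pyRepeat [1, 1] (spans2.length : Int)
  let spans : List Int := (spans1 ++ spans2).flatMap (fun sp => [sp.1, sp.2])
  -- sorted(zip(spans, tags)): Python compares the (span, tag) tuples lexicographically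
  let r := (PySem.List.sorted2 (spans.zip tags) Prod.fst Prod.snd).foldl pvStep ((false, false), 0, 0, 0)
  (r.2.2.2, r.2.2.1)

-- ===== PORT B =====
-- sum(pts[i + 1] - pts[i] for i in range(0, len(pts), 2)) rendered as the same
-- two-at-a-time walk over the sorted list, as structural recursion
def pvPairSum : List Int → Int
  | a :: b :: rest => (b - a) + pvPairSum rest
  | _ => 0

-- sorted(p for sp in spans for p in sp)
def pvSortedPts (spans : List (Int × Int)) : List Int :=
  PySem.List.sorted (spans.flatMap (fun sp => [sp.1, sp.2])) (fun x => x)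

def overlap_spans_alt (spans1 : List (Int × Int)) (spans2 : List (Int × Int)) : Int × Int :=
  let t1 := pvPairSum (pvSortedPts spans1)
  let t2 := pvPairSum (pvSortedPts spans2)
  let td := pvPairSum (pvSortedPts (spans1 ++ spans2))
  (PySem.Int.floordiv (t1 + t2 - td) 2, PySem.Int.floordiv (t1 + t2 + td) 2)

-- ===== PRECONDITION & SPEC =====
def Spec_overlap_spans (spans1 : List (Int × Int)) (spans2 : List (Int × Int)) (out : Int × Int) : Prop := out = overlap_spans_alt spans1 spans2
instance (spans1 : List (Int × Int)) (spans2 : List (Int × Int)) (out : Int × Int) : Decidable (Spec_overlap_spans spans1 spans2 out) := by unfold Spec_overlap_spans; infer_instance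

-- ===== CLAIM (what is proved, stated in full; the proofs are below) =====
def Claim_equal_overlap_spans : Prop := ∀ (spans1 : List (Int × Int)) (spans2 : List (Int × Int)), Dom_overlap_spans spans1 spans2 → Spec_overlap_spans spans1 spans2 (overlap_spans spans1 spans2)

-- ===== LEMMAS AND PROOFS =====

-- 0/1 indicator of a boolean
def pvInd (b : Bool) : Int := if b then 1 else 0
-- parity of a count
def pvPar (n : Nat) : Bool := n % 2 == 1
-- x is covered by the parity (XOR) interpretation of the point multiset P
def pvCov (P : List Int) (x : Int) : Bool := pvPar (P.countP (fun p => decide (p ≤ x)))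
-- coverage for tag `tg` seen from a sweep state bit `s` with pending events E
def pvCovE (tg : Int) (s : Bool) (E : List (Int × Int)) (x : Int) : Bool :=
  xor s (pvPar (E.countP (fun e => e.2 == tg && decide (e.1 ≤ x))))
-- sum of f over the half-open integer interval [lo, hi)
def pvSum (lo hi : Int) (f : Int → Int) : Int := ∑ i ∈ Finset.range (hi - lo).toNat, f (lo + i)
-- coordinate of the last event, or l if none
def pvLastC : List (Int × Int) → Int → Int
  | [], l => l
  | e :: r, _ => pvLastC r e.1
-- bounds enclosing every coordinate Dom_overlap_spans admits
def pvLo : Int := -2147483649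
def pvHi : Int := 2147483649

theorem pvSum_eq_Ico (lo hi : Int) (f : Int → Int) : pvSum lo hi f = ∑ x ∈ Finset.Ico lo hi, f x := by
  unfold pvSum
  refine Finset.sum_nbij' (fun i => lo + i) (fun x => (x - lo).toNat) ?_ ?_ ?_ ?_ ?_
  all_goals intro a ha; simp at ha ⊢; try omega

theorem pvPar_add (m n : Nat) : pvPar (m + n) = xor (pvPar m) (pvPar n) := by
  unfold pvPar
  rcases Nat.mod_two_eq_zero_or_one m with hm | hm <;> rcases Nat.mod_two_eq_zero_or_one n with hn | hn <;>
    simp [Nat.add_mod, hm, hn]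

theorem pvPar_even (n : Nat) : pvPar (2 * n) = false := by
  unfold pvPar; simp [Nat.mul_mod_right]

theorem pvSum_split (lo m hi : Int) (f : Int → Int) (h1 : lo ≤ m) (h2 : m ≤ hi) :
    pvSum lo hi f = pvSum lo m f + pvSum m hi f := by
  rw [pvSum_eq_Ico, pvSum_eq_Ico, pvSum_eq_Ico]
  rw [← Finset.Ico_union_Ico_eq_Ico h1 h2, Finset.sum_union (Finset.Ico_disjoint_Ico_consecutive lo m hi)]

theorem pvSum_congr (lo hi : Int) (f g : Int → Int) (h : ∀ x, lo ≤ x → x < hi → f x = g x) :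
    pvSum lo hi f = pvSum lo hi g := by
  rw [pvSum_eq_Ico, pvSum_eq_Ico]
  refine Finset.sum_congr rfl ?_
  intro x hx; simp [Finset.mem_Ico] at hx; exact h x hx.1 hx.2

theorem pvSum_zero (lo hi : Int) (f : Int → Int) (h : ∀ x, lo ≤ x → x < hi → f x = 0) :
    pvSum lo hi f = 0 := by
  rw [pvSum_congr lo hi f (fun _ => 0) h, pvSum_eq_Ico, Finset.sum_const_zero]

theorem pvSum_const (lo hi k : Int) (h : lo ≤ hi) : pvSum lo hi (fun _ => k) = (hi - lo) * k := by
  rw [pvSum_eq_Ico, Finset.sum_const, Int.card_Ico]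
  simp
  omega

theorem pvSum_window (lo hi a b : Int) (h1 : lo ≤ a) (hab : a ≤ b) (h2 : b ≤ hi) :
    pvSum lo hi (fun x => pvInd (decide (a ≤ x) && decide (x < b))) = b - a := by
  rw [pvSum_eq_Ico]
  have : ∀ x, pvInd (decide (a ≤ x) && decide (x < b)) = if x ∈ Finset.Ico a b then (1:Int) else 0 := by
    intro x; simp [pvInd, Finset.mem_Ico]
  simp only [this]
  rw [Finset.sum_ite_mem, Finset.inter_eq_right.mpr (Finset.Ico_subset_Ico h1 h2),
    Finset.sum_const, Int.card_Ico]
  simp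
  omega

theorem pvSum_add (lo hi : Int) (f g : Int → Int) :
    pvSum lo hi (fun x => f x + g x) = pvSum lo hi f + pvSum lo hi g := by
  rw [pvSum_eq_Ico, pvSum_eq_Ico, pvSum_eq_Ico, Finset.sum_add_distrib]

theorem pvSum_mul (lo hi k : Int) (f : Int → Int) :
    pvSum lo hi (fun x => k * f x) = k * pvSum lo hi f := by
  rw [pvSum_eq_Ico, pvSum_eq_Ico, Finset.mul_sum]

theorem insertBy_pairwise_key {α : Type} (k : α → Int) (before : α → α → Bool)
    (htrue : ∀ a b, before a b = true → k a ≤ k b)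
    (hfalse : ∀ a b, before a b = false → k b ≤ k a)
    (x : α) (acc : List α) (h : acc.Pairwise (fun a b => k a ≤ k b)) :
    (PySem.List.insertBy before x acc).Pairwise (fun a b => k a ≤ k b) := by
  induction acc with
  | nil => simp [PySem.List.insertBy]
  | cons y ys ih =>
    rw [List.pairwise_cons] at h
    by_cases hb : before x y = true
    · simp [PySem.List.insertBy, hb]
      refine ⟨⟨htrue _ _ hb, ?_⟩, h.1, h.2⟩
      intro z hz; exact le_trans (htrue _ _ hb) (h.1 z hz)
    · rw [Bool.not_eq_true] at hb
      simp [PySem.List.insertBy, hb]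
      refine ⟨?_, ih h.2⟩
      intro z hz
      rw [PySem.List.mem_insertBy] at hz
      rcases hz with rfl | hz
      · exact hfalse _ _ hb
      · exact h.1 z hz

theorem sorted2_fst_pairwise (xs : List (Int × Int)) :
    (PySem.List.sorted2 xs Prod.fst Prod.snd).Pairwise (fun a b => a.1 ≤ b.1) := by
  show (List.foldl _ [] xs).Pairwise _
  suffices h : ∀ acc : List (Int × Int), acc.Pairwise (fun a b => a.1 ≤ b.1) →
      (List.foldl (fun acc x => PySem.List.insertBy
        (fun a b => decide (a.1 < b.1) || !decide (b.1 < a.1) && decide (a.2 < b.2)) x acc) acc xs).Pairwise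
        (fun a b => a.1 ≤ b.1) by
    exact h [] (by simp)
  induction xs with
  | nil => intro acc hacc; simpa using hacc
  | cons z zs ih =>
    intro acc hacc
    simp only [List.foldl_cons]
    refine ih _ ?_
    refine insertBy_pairwise_key Prod.fst _ ?_ ?_ z acc hacc
    · intro a b hab; simp at hab; rcases hab with h1 | h1
      · exact le_of_lt h1
      · exact h1.1
    · intro a b hab; simp at hab; exact hab.1

theorem pvLastC_spec (E : List (Int × Int)) (l : Int)
    (hp : (E.map Prod.fst).Pairwise (· ≤ ·)) (hl : ∀ e ∈ E, l ≤ e.1) :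
    l ≤ pvLastC E l ∧ ∀ e ∈ E, e.1 ≤ pvLastC E l := by
  induction E generalizing l with
  | nil => simp [pvLastC]
  | cons e r ih =>
    simp only [List.map_cons, List.pairwise_cons] at hp
    have hr := ih e.1 hp.2 (by intro e' he'; exact hp.1 e'.1 (List.mem_map_of_mem he'))
    refine ⟨le_trans (hl e (by simp)) hr.1, ?_⟩
    intro e' he'
    rcases List.mem_cons.mp he' with rfl | he'
    · exact hr.1
    · exact hr.2 e' he'

theorem pvLastC_mem (E : List (Int × Int)) (l : Int) :
    pvLastC E l = l ∨ ∃ e ∈ E, pvLastC E l = e.1 := by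
  induction E generalizing l with
  | nil => left; rfl
  | cons e r ih =>
    rcases ih e.1 with h | ⟨e', he', h⟩
    · right; exact ⟨e, by simp, h⟩
    · right; exact ⟨e', by simp [he'], h⟩

theorem pvCovE_below (tg : Int) (s : Bool) (E : List (Int × Int)) (x : Int)
    (h : ∀ e ∈ E, x < e.1) : pvCovE tg s E x = s := by
  unfold pvCovE
  have : E.countP (fun e => e.2 == tg && decide (e.1 ≤ x)) = 0 := by
    rw [List.countP_eq_zero]
    intro e he; simp; intro _; exact h e he
  simp [this, pvPar]

theorem pvCovE_cons_of_le (tg : Int) (s : Bool) (c t x : Int) (rest : List (Int × Int)) (hcx : c ≤ x) :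
    pvCovE tg s ((c, t) :: rest) x = pvCovE tg (xor s (t == tg)) rest x := by
  unfold pvCovE
  rw [List.countP_cons]
  simp only [hcx]
  by_cases ht : t = tg <;>
    simp [ht, pvPar] <;>
    rcases Nat.mod_two_eq_zero_or_one (List.countP (fun e => e.2 == tg && decide (e.1 ≤ x)) rest) with h | h <;>
    simp [Nat.add_mod, h] <;> try exact ht

theorem sweep_inv (E : List (Int × Int)) (s0 s1 : Bool) (l uni inter : Int)
    (hp : (E.map Prod.fst).Pairwise (· ≤ ·)) (hl : ∀ e ∈ E, l ≤ e.1)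
    (htag : ∀ e ∈ E, e.2 = 0 ∨ e.2 = 1) :
    E.foldl pvStep ((s0, s1), l, uni, inter) =
      ((xor s0 (pvPar (E.countP (fun e => e.2 == 0))), xor s1 (pvPar (E.countP (fun e => e.2 == 1)))),
       pvLastC E l,
       uni + pvSum l (pvLastC E l) (fun x => pvInd (pvCovE 0 s0 E x || pvCovE 1 s1 E x)),
       inter + pvSum l (pvLastC E l) (fun x => pvInd (pvCovE 0 s0 E x && pvCovE 1 s1 E x))) := by
  induction E generalizing s0 s1 l uni inter with
  | nil =>
    simp [pvLastC, pvCovE, pvPar, pvSum]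
  | cons e rest ih =>
    obtain ⟨c, t⟩ := e
    simp only [List.map_cons, List.pairwise_cons] at hp
    have hlc : l ≤ c := hl (c, t) (by simp)
    have hrest_ge : ∀ e ∈ rest, c ≤ e.1 := by
      intro e he; exact hp.1 e.1 (List.mem_map_of_mem he)
    have hL := pvLastC_spec rest c hp.2 hrest_ge
    set L := pvLastC rest c with hLdef
    have hstep : pvStep ((s0, s1), l, uni, inter) (c, t) =
        ((xor s0 (t == 0), xor s1 (!(t == 0))),
         c,
         (if s0 || s1 then uni + (c - l) else uni),
         (if s0 && s1 then inter + (c - l) else inter)) := by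
      unfold pvStep
      by_cases ht : t = 0
      · simp [ht]
      · have hbt : (t == 0) = false := by simp [ht]
        simp [hbt]
    rw [List.foldl_cons, hstep,
      ih (xor s0 (t == 0)) (xor s1 (!(t == 0))) c _ _ hp.2 hrest_ge (fun e he => htag e (by simp [he]))]
    have hlast : pvLastC ((c, t) :: rest) l = L := rfl
    have hsplit : ∀ f : Int → Int, pvSum l L f = pvSum l c f + pvSum c L f :=
      fun f => pvSum_split l c L f hlc hL.1
    have hcovlow : ∀ tg s, ∀ x, l ≤ x → x < c → pvCovE tg s ((c, t) :: rest) x = s := by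
      intro tg s x _ hxc
      refine pvCovE_below tg s _ x ?_
      intro e he
      rcases List.mem_cons.mp he with rfl | he
      · exact hxc
      · exact lt_of_lt_of_le hxc (hrest_ge e he)
    have hcovhigh : ∀ tg s, ∀ x, c ≤ x →
        pvCovE tg s ((c, t) :: rest) x = pvCovE tg (xor s (t == tg)) rest x := by
      intro tg s x hcx; exact pvCovE_cons_of_le tg s c t x rest hcx
    refine Prod.ext ?_ (Prod.ext rfl (Prod.ext ?_ ?_))
    · -- state components
      have ht01 := htag (c, t) (by simp)
      simp only [List.countP_cons]
      rcases ht01 with rfl | rfl <;>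
        simp [pvPar] <;>
        rcases Nat.mod_two_eq_zero_or_one (List.countP (fun e => e.2 == 0) rest) with h0 | h0 <;>
        rcases Nat.mod_two_eq_zero_or_one (List.countP (fun e => e.2 == 1) rest) with h1 | h1 <;>
        simp [Nat.add_mod, h0, h1]
    · -- union
      show (if s0 || s1 then uni + (c - l) else uni) + pvSum c L _ = uni + pvSum l L _
      rw [hsplit]
      have h1 : pvSum l c (fun x => pvInd (pvCovE 0 s0 ((c, t) :: rest) x || pvCovE 1 s1 ((c, t) :: rest) x))
          = (c - l) * pvInd (s0 || s1) := by
        rw [pvSum_congr l c _ (fun _ => pvInd (s0 || s1)) ?_, pvSum_const l c _ hlc]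
        intro x hx1 hx2
        rw [hcovlow 0 s0 x hx1 hx2, hcovlow 1 s1 x hx1 hx2]
      have h2 : pvSum c L (fun x => pvInd (pvCovE 0 s0 ((c, t) :: rest) x || pvCovE 1 s1 ((c, t) :: rest) x))
          = pvSum c L (fun x => pvInd (pvCovE 0 (xor s0 (t == 0)) rest x || pvCovE 1 (xor s1 (!(t == 0))) rest x)) := by
        refine pvSum_congr c L _ _ ?_
        intro x hx1 _
        rw [hcovhigh 0 s0 x hx1, hcovhigh 1 s1 x hx1]
        have ht01 := htag (c, t) (by simp)
        rcases ht01 with rfl | rfl <;> simp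
      rw [h1, h2]
      cases s0 <;> cases s1 <;> simp [pvInd] <;> ring
    · -- intersection
      show (if s0 && s1 then inter + (c - l) else inter) + pvSum c L _ = inter + pvSum l L _
      rw [hsplit]
      have h1 : pvSum l c (fun x => pvInd (pvCovE 0 s0 ((c, t) :: rest) x && pvCovE 1 s1 ((c, t) :: rest) x))
          = (c - l) * pvInd (s0 && s1) := by
        rw [pvSum_congr l c _ (fun _ => pvInd (s0 && s1)) ?_, pvSum_const l c _ hlc]
        intro x hx1 hx2
        rw [hcovlow 0 s0 x hx1 hx2, hcovlow 1 s1 x hx1 hx2]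
      have h2 : pvSum c L (fun x => pvInd (pvCovE 0 s0 ((c, t) :: rest) x && pvCovE 1 s1 ((c, t) :: rest) x))
          = pvSum c L (fun x => pvInd (pvCovE 0 (xor s0 (t == 0)) rest x && pvCovE 1 (xor s1 (!(t == 0))) rest x)) := by
        refine pvSum_congr c L _ _ ?_
        intro x hx1 _
        rw [hcovhigh 0 s0 x hx1, hcovhigh 1 s1 x hx1]
        have ht01 := htag (c, t) (by simp)
        rcases ht01 with rfl | rfl <;> simp
      rw [h1, h2]
      cases s0 <;> cases s1 <;> simp [pvInd] <;> ring

theorem pairSum_eq (lo hi : Int) (Q : List Int) (hs : Q.Pairwise (· ≤ ·))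
    (heven : Q.length % 2 = 0) (hb : ∀ q ∈ Q, lo ≤ q ∧ q < hi) :
    pvPairSum Q = pvSum lo hi (fun x => pvInd (pvCov Q x)) := by
  induction Q using pvPairSum.induct with
  | case1 a b rest ih =>
    rw [List.pairwise_cons] at hs
    have hsb := hs.2
    rw [List.pairwise_cons] at hsb
    have hab : a ≤ b := hs.1 b (by simp)
    have hrest_ge : ∀ q ∈ rest, b ≤ q := hsb.1
    have hba : ∀ q ∈ rest, lo ≤ q ∧ q < hi := fun q hq => hb q (by simp [hq])
    have ha := hb a (by simp)
    have hbq := hb b (by simp)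
    have hkey : ∀ x, lo ≤ x → x < hi →
        pvInd (pvCov (a :: b :: rest) x) =
          pvInd (pvCov rest x) + pvInd (decide (a ≤ x) && decide (x < b)) := by
      intro x _ _
      unfold pvCov
      rw [List.countP_cons, List.countP_cons]
      by_cases hax : a ≤ x
      · by_cases hbx : b ≤ x
        · have : ¬ x < b := by omega
          simp [pvPar, hax, hbx, this, Nat.add_mod, pvInd]
          rcases Nat.mod_two_eq_zero_or_one (List.countP (fun p => decide (p ≤ x)) rest) with h | h <;> simp [h]
        · have hcnt : List.countP (fun p => decide (p ≤ x)) rest = 0 := by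
            rw [List.countP_eq_zero]
            intro q hq; simp
            have := hrest_ge q hq
            omega
          simp [pvPar, hax, hbx, hcnt, pvInd]
      · have hbx : ¬ b ≤ x := by omega
        simp [pvPar, hax, hbx, pvInd]
    show (b - a) + pvPairSum rest = _
    rw [pvSum_congr lo hi _ _ hkey]
    have : pvSum lo hi (fun x => pvInd (pvCov rest x) + pvInd (decide (a ≤ x) && decide (x < b)))
        = pvSum lo hi (fun x => pvInd (pvCov rest x)) + pvSum lo hi (fun x => pvInd (decide (a ≤ x) && decide (x < b))) := by
      rw [pvSum_eq_Ico, pvSum_eq_Ico, pvSum_eq_Ico, Finset.sum_add_distrib]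
    rw [this, pvSum_window lo hi a b ha.1 hab (by omega),
      ← ih hsb.2 (by simp at heven; omega) hba]
    ring
  | case2 Q h =>
    have hQ : Q = [] := by
      match Q, h with
      | [], _ => rfl
      | [a], h => simp at heven
      | a :: b :: r, h => exact absurd rfl (h a b r)
    subst hQ
    have : ∀ x, lo ≤ x → x < hi → pvInd (pvCov [] x) = 0 := by
      intro x _ _; simp [pvCov, pvPar, pvInd]
    show (0:Int) = _
    rw [pvSum_zero lo hi _ this]

theorem flatten_rep_pair (m : Nat) (a : Int) :
    (List.replicate m [a, a]).flatten = List.replicate (2 * m) a := by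
  induction m with
  | zero => simp
  | succ n ih =>
    rw [List.replicate_succ, List.flatten_cons, ih,
      show 2 * (n + 1) = 2 + 2 * n by ring, List.replicate_add]
    rfl

theorem len_flatMap_pair (s : List (Int × Int)) :
    (s.flatMap (fun sp => [sp.1, sp.2])).length = 2 * s.length := by
  induction s with
  | nil => simp
  | cons sp r ih => simp [ih]; omega

theorem zip_rep (P : List Int) (a : Int) :
    P.zip (List.replicate P.length a) = P.map (fun p => (p, a)) := by
  induction P with
  | nil => rfl
  | cons p r ih => simp [List.replicate_succ, ih]

theorem zip_tags (s1 s2 : List (Int × Int)) :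
    ((s1 ++ s2).flatMap (fun sp => [sp.1, sp.2])).zip
      (PySem.List.pyRepeat [0, 0] (s1.length : Int) ++ PySem.List.pyRepeat [1, 1] (s2.length : Int)) =
    (s1.flatMap (fun sp => [sp.1, sp.2])).map (fun p => (p, (0:Int))) ++
      (s2.flatMap (fun sp => [sp.1, sp.2])).map (fun p => (p, (1:Int))) := by
  have hrep : ∀ (n : Nat) (a : Int), PySem.List.pyRepeat [a, a] (n : Int) = List.replicate (2 * n) a := by
    intro n a
    unfold PySem.List.pyRepeat
    rw [Int.toNat_natCast, flatten_rep_pair]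
  rw [List.flatMap_append, hrep, hrep,
    ← len_flatMap_pair s1, ← len_flatMap_pair s2,
    List.zip_append (by simp), zip_rep, zip_rep]

theorem pvCov_nil (x : Int) : pvCov [] x = false := rfl

theorem pvCov_perm (P Q : List Int) (h : P.Perm Q) (x : Int) : pvCov P x = pvCov Q x := by
  unfold pvCov; rw [h.countP_eq]

theorem pvCov_append (P Q : List Int) (x : Int) :
    pvCov (P ++ Q) x = xor (pvCov P x) (pvCov Q x) := by
  unfold pvCov; rw [List.countP_append, pvPar_add]

-- B-side: each pair-sum is the measure of the parity coverage of its point list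

theorem pairsum_sorted_eq (P : List Int) (heven : P.length % 2 = 0)
    (hb : ∀ p ∈ P, pvLo ≤ p ∧ p < pvHi) :
    pvPairSum (PySem.List.sorted P (fun x => x)) =
      pvSum pvLo pvHi (fun x => pvInd (pvCov P x)) := by
  have hperm := PySem.List.sorted_perm P (fun x => x) false
  rw [pairSum_eq pvLo pvHi _ (by simpa using PySem.List.sorted_pairwise P (fun x => x))
    (by rw [PySem.List.length_sorted]; exact heven)
    (fun q hq => hb q (hperm.mem_iff.mp hq))]
  exact pvSum_congr _ _ _ _ (fun x _ _ => by rw [pvCov_perm _ _ hperm])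

theorem overlap_spans_eq_alt : ∀ (s1 s2 : List (Int × Int)), Dom_overlap_spans s1 s2 →
    overlap_spans s1 s2 = overlap_spans_alt s1 s2 := by
  intro s1 s2 hdom
  -- the two point multisets and their bounds
  set P1 := s1.flatMap (fun sp => [sp.1, sp.2]) with hP1
  set P2 := s2.flatMap (fun sp => [sp.1, sp.2]) with hP2
  have hdom' : (∀ a b : Int, (a, b) ∈ s1 → pvDomInt a ∧ pvDomInt b) ∧ (∀ a b : Int, (a, b) ∈ s2 → pvDomInt a ∧ pvDomInt b) := by
    unfold Dom_overlap_spans at hdom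
    simp [List.all_eq_true] at hdom
    exact hdom
  have hb1 : ∀ p ∈ P1, pvLo ≤ p ∧ p < pvHi := by
    intro p hp
    rw [hP1, List.mem_flatMap] at hp
    obtain ⟨sp, hsp, hmem⟩ := hp
    have := hdom'.1 sp.1 sp.2 hsp
    unfold pvDomInt at this
    simp at this hmem
    unfold pvLo pvHi
    rcases hmem with rfl | rfl <;> omega
  have hb2 : ∀ p ∈ P2, pvLo ≤ p ∧ p < pvHi := by
    intro p hp
    rw [hP2, List.mem_flatMap] at hp
    obtain ⟨sp, hsp, hmem⟩ := hp
    have := hdom'.2 sp.1 sp.2 hsp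
    unfold pvDomInt at this
    simp at this hmem
    unfold pvLo pvHi
    rcases hmem with rfl | rfl <;> omega
  -- the target measures
  set I := pvSum pvLo pvHi (fun x => pvInd (pvCov P1 x && pvCov P2 x)) with hI
  set U := pvSum pvLo pvHi (fun x => pvInd (pvCov P1 x || pvCov P2 x)) with hU
  -- ===== B side =====
  have hlen1 : P1.length = 2 * s1.length := len_flatMap_pair s1
  have hlen2 : P2.length = 2 * s2.length := len_flatMap_pair s2
  have hT1 := pairsum_sorted_eq P1 (by omega) hb1
  have hT2 := pairsum_sorted_eq P2 (by omega) hb2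
  have hP12 : (s1 ++ s2).flatMap (fun sp => [sp.1, sp.2]) = P1 ++ P2 := List.flatMap_append
  have hTd : pvPairSum (pvSortedPts (s1 ++ s2)) =
      pvSum pvLo pvHi (fun x => pvInd (xor (pvCov P1 x) (pvCov P2 x))) := by
    unfold pvSortedPts
    rw [hP12, pairsum_sorted_eq (P1 ++ P2)
      (by rw [List.length_append]; omega)
      (by intro p hp; rcases List.mem_append.mp hp with h | h; exacts [hb1 p h, hb2 p h])]
    exact pvSum_congr _ _ _ _ (fun x _ _ => by rw [pvCov_append])
  have hsum : pvPairSum (pvSortedPts s1) = pvSum pvLo pvHi (fun x => pvInd (pvCov P1 x)) := hT1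
  have hsum2 : pvPairSum (pvSortedPts s2) = pvSum pvLo pvHi (fun x => pvInd (pvCov P2 x)) := hT2
  have hIsum : pvSum pvLo pvHi (fun x => pvInd (pvCov P1 x)) + pvSum pvLo pvHi (fun x => pvInd (pvCov P2 x))
      - pvSum pvLo pvHi (fun x => pvInd (xor (pvCov P1 x) (pvCov P2 x))) = 2 * I := by
    rw [← pvSum_add, hI, ← pvSum_mul]
    rw [pvSum_eq_Ico, pvSum_eq_Ico, pvSum_eq_Ico, ← Finset.sum_sub_distrib]
    refine Finset.sum_congr rfl ?_
    intro x _
    cases pvCov P1 x <;> cases pvCov P2 x <;> simp [pvInd]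
  have hUsum : pvSum pvLo pvHi (fun x => pvInd (pvCov P1 x)) + pvSum pvLo pvHi (fun x => pvInd (pvCov P2 x))
      + pvSum pvLo pvHi (fun x => pvInd (xor (pvCov P1 x) (pvCov P2 x))) = 2 * U := by
    rw [← pvSum_add, hU, ← pvSum_mul]
    rw [pvSum_eq_Ico, pvSum_eq_Ico, pvSum_eq_Ico, ← Finset.sum_add_distrib]
    refine Finset.sum_congr rfl ?_
    intro x _
    cases pvCov P1 x <;> cases pvCov P2 x <;> simp [pvInd]
  have hB : overlap_spans_alt s1 s2 = (I, U) := by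
    show (PySem.Int.floordiv _ 2, PySem.Int.floordiv _ 2) = (I, U)
    rw [hsum, hsum2, hTd, hIsum, hUsum,
      PySem.Int.floordiv_eq_ediv_of_pos (by norm_num), PySem.Int.floordiv_eq_ediv_of_pos (by norm_num),
      Int.mul_ediv_cancel_left I (by norm_num), Int.mul_ediv_cancel_left U (by norm_num)]
  -- ===== A side =====
  set E := PySem.List.sorted2
      (((s1 ++ s2).flatMap (fun sp => [sp.1, sp.2])).zip
        (PySem.List.pyRepeat ([0, 0] : List Int) (s1.length : Int) ++ PySem.List.pyRepeat ([1, 1] : List Int) (s2.length : Int)))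
      Prod.fst Prod.snd with hE
  have hAdef : overlap_spans s1 s2 =
      ((E.foldl pvStep ((false, false), 0, 0, 0)).2.2.2, (E.foldl pvStep ((false, false), 0, 0, 0)).2.2.1) := rfl
  have hperm : E.Perm (P1.map (fun p => (p, (0:Int))) ++ P2.map (fun p => (p, (1:Int)))) := by
    rw [hE, ← zip_tags s1 s2]
    exact PySem.List.sorted2_perm _ _ _ _
  have hpair : E.Pairwise (fun a b => a.1 ≤ b.1) := sorted2_fst_pairwise _
  have hmem : ∀ e, e ∈ E ↔ (e.1 ∈ P1 ∧ e.2 = 0) ∨ (e.1 ∈ P2 ∧ e.2 = 1) := by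
    intro e
    rw [hperm.mem_iff, List.mem_append, List.mem_map, List.mem_map]
    constructor
    · rintro (⟨p, hp, rfl⟩ | ⟨p, hp, rfl⟩)
      · exact Or.inl ⟨hp, rfl⟩
      · exact Or.inr ⟨hp, rfl⟩
    · rintro (⟨h1, h2⟩ | ⟨h1, h2⟩)
      · left; exact ⟨e.1, h1, by rw [← h2]⟩
      · right; exact ⟨e.1, h1, by rw [← h2]⟩
  have htags : ∀ e ∈ E, e.2 = 0 ∨ e.2 = 1 := by
    intro e he; rcases (hmem e).mp he with ⟨_, h⟩ | ⟨_, h⟩ <;> [exact Or.inl h; exact Or.inr h]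
  have hbe : ∀ e ∈ E, pvLo ≤ e.1 ∧ e.1 < pvHi := by
    intro e he; rcases (hmem e).mp he with ⟨h, _⟩ | ⟨h, _⟩ <;> [exact hb1 _ h; exact hb2 _ h]
  -- coverage of P1/P2 equals tagged coverage of the full event list
  have hcovfull : ∀ x, pvCov P1 x = pvCovE 0 false E x ∧ pvCov P2 x = pvCovE 1 false E x := by
    intro x
    unfold pvCov pvCovE
    rw [hperm.countP_eq, hperm.countP_eq, List.countP_append, List.countP_append,
      List.countP_map, List.countP_map, List.countP_map, List.countP_map]
    constructor
    · have h2 : List.countP ((fun (e : Int × Int) => e.2 == 0 && decide (e.1 ≤ x)) ∘ (fun p => (p, (1:Int)))) P2 = 0 := by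
        rw [List.countP_eq_zero]; intro p _; simp
      have h1 : ((fun (e : Int × Int) => e.2 == 0 && decide (e.1 ≤ x)) ∘ (fun p => (p, (0:Int)))) = (fun p => decide (p ≤ x)) := by
        funext p; simp
      rw [h2, h1]; simp
    · have h2 : List.countP ((fun (e : Int × Int) => e.2 == 1 && decide (e.1 ≤ x)) ∘ (fun p => (p, (0:Int)))) P1 = 0 := by
        rw [List.countP_eq_zero]; intro p _; simp
      have h1 : ((fun (e : Int × Int) => e.2 == 1 && decide (e.1 ≤ x)) ∘ (fun p => (p, (1:Int)))) = (fun p => decide (p ≤ x)) := by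
        funext p; simp
      rw [h2, h1]; simp
  have hA : overlap_spans s1 s2 = (I, U) := by
    rw [hAdef]
    match hEc : E with
    | [] =>
      have hmaps := hperm
      rw [hEc] at hmaps
      have happ := hmaps.symm.eq_nil
      rcases List.append_eq_nil_iff.mp happ with ⟨hm1, hm2⟩
      have hP1nil : P1 = [] := List.map_eq_nil_iff.mp hm1
      have hP2nil : P2 = [] := List.map_eq_nil_iff.mp hm2
      have : ∀ x, pvLo ≤ x → x < pvHi → pvInd (pvCov P1 x && pvCov P2 x) = 0 := by
        intro x _ _; rw [hP1nil, pvCov_nil]; simp [pvInd]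
      have hI0 : I = 0 := by rw [hI]; exact pvSum_zero _ _ _ this
      have : ∀ x, pvLo ≤ x → x < pvHi → pvInd (pvCov P1 x || pvCov P2 x) = 0 := by
        intro x _ _
        rw [hP1nil, pvCov_nil, hP2nil, pvCov_nil]
        simp [pvInd]
      have hU0 : U = 0 := by rw [hU]; exact pvSum_zero _ _ _ this
      rw [hI0, hU0]
      rfl
    | (c, t) :: rest =>
      rw [hEc] at hpair htags hbe hcovfull hmem
      have hpairm : ((((c, t) :: rest).map Prod.fst)).Pairwise (· ≤ ·) := by
        rw [List.pairwise_map]; exact hpair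
      simp only [List.map_cons, List.pairwise_cons] at hpairm
      have hrest_ge : ∀ e ∈ rest, c ≤ e.1 := fun e he => hpairm.1 e.1 (List.mem_map_of_mem he)
      have hall : ∀ e ∈ ((c, t) :: rest), c ≤ e.1 := by
        intro e he
        rcases List.mem_cons.mp he with rfl | he
        · exact le_refl _
        · exact hrest_ge e he
      have hLspec := pvLastC_spec rest c hpairm.2 hrest_ge
      set L := pvLastC rest c with hLdef
      have hcL : c ≤ L := hLspec.1
      have hbc : pvLo ≤ c ∧ c < pvHi := hbe (c, t) (by simp)
      have hbL : pvLo ≤ L ∧ L < pvHi := by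
        rcases pvLastC_mem rest c with h | ⟨e, he, h⟩
        · rw [← hLdef] at h; rw [h]; exact hbc
        · rw [← hLdef] at h; rw [h]; exact hbe e (by simp [he])
      -- the toggled state after the first event
      have ht01 : t = 0 ∨ t = 1 := htags (c, t) (by simp)
      have hstep1 : pvStep ((false, false), 0, 0, 0) (c, t) =
          ((t == 0, !(t == 0)), c, 0, 0) := by
        unfold pvStep
        rcases ht01 with rfl | rfl <;> simp
      rw [List.foldl_cons, hstep1,
        sweep_inv rest (t == 0) (!(t == 0)) c 0 0 hpairm.2 hrest_ge (fun e he => htags e (by simp [he]))]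
      -- the middle segment carries exactly the parity coverage
      have hmid : ∀ x, c ≤ x →
          (pvCovE 0 (t == 0) rest x = pvCov P1 x ∧ pvCovE 1 (!(t == 0)) rest x = pvCov P2 x) := by
        intro x hcx
        have h1 := (hcovfull x).1
        have h2 := (hcovfull x).2
        rw [pvCovE_cons_of_le 0 false c t x rest hcx] at h1
        rw [pvCovE_cons_of_le 1 false c t x rest hcx] at h2
        constructor
        · rw [h1]; rcases ht01 with rfl | rfl <;> simp
        · rw [h2]; rcases ht01 with rfl | rfl <;> simp
      -- coverage is false below c and above L
      have hlowzero : ∀ x, pvLo ≤ x → x < c → pvCov P1 x = false ∧ pvCov P2 x = false := by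
        intro x _ hxc
        have h1 := (hcovfull x).1
        have h2 := (hcovfull x).2
        rw [pvCovE_below 0 false _ x (fun e he => lt_of_lt_of_le hxc (hall e he))] at h1
        rw [pvCovE_below 1 false _ x (fun e he => lt_of_lt_of_le hxc (hall e he))] at h2
        exact ⟨h1, h2⟩
      have hcoord : ∀ p ∈ P1, (p, (0:Int)) ∈ ((c, t) :: rest) := by
        intro p hp; exact (hmem (p, 0)).mpr (Or.inl ⟨hp, rfl⟩)
      have hcoord2 : ∀ p ∈ P2, (p, (1:Int)) ∈ ((c, t) :: rest) := by
        intro p hp; exact (hmem (p, 1)).mpr (Or.inr ⟨hp, rfl⟩)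
      have hhighzero : ∀ x, L ≤ x → x < pvHi → pvCov P1 x = false ∧ pvCov P2 x = false := by
        intro x hLx _
        have hle : ∀ e ∈ ((c, t) :: rest), e.1 ≤ x := by
          intro e he
          rcases List.mem_cons.mp he with rfl | he
          · exact le_trans hcL hLx
          · exact le_trans (hLspec.2 e he) hLx
        constructor
        · unfold pvCov
          have : List.countP (fun p => decide (p ≤ x)) P1 = P1.length := by
            rw [List.countP_eq_length]
            intro p hp; simpa using hle _ (hcoord p hp)
          rw [this, hlen1, pvPar_even]
        · unfold pvCov
          have : List.countP (fun p => decide (p ≤ x)) P2 = P2.length := by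
            rw [List.countP_eq_length]
            intro p hp; simpa using hle _ (hcoord2 p hp)
          rw [this, hlen2, pvPar_even]
      -- assemble: the sweep sums over [c, L) equal I and U
      have hIeq : pvSum c L (fun x => pvInd (pvCovE 0 (t == 0) rest x && pvCovE 1 (!(t == 0)) rest x)) = I := by
        rw [hI, pvSum_split pvLo c pvHi _ hbc.1 (le_of_lt hbc.2),
          pvSum_split c L pvHi _ hcL (le_of_lt hbL.2)]
        rw [pvSum_zero pvLo c _ (fun x h1 h2 => by rw [(hlowzero x h1 h2).1]; simp [pvInd]),
          pvSum_zero L pvHi _ (fun x h1 h2 => by rw [(hhighzero x h1 h2).1, (hhighzero x h1 h2).2]; simp [pvInd])]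
        rw [pvSum_congr c L _ _ (fun x h1 _ => by rw [(hmid x h1).1, (hmid x h1).2])]
        ring
      have hUeq : pvSum c L (fun x => pvInd (pvCovE 0 (t == 0) rest x || pvCovE 1 (!(t == 0)) rest x)) = U := by
        rw [hU, pvSum_split pvLo c pvHi _ hbc.1 (le_of_lt hbc.2),
          pvSum_split c L pvHi _ hcL (le_of_lt hbL.2)]
        rw [pvSum_zero pvLo c _ (fun x h1 h2 => by rw [(hlowzero x h1 h2).1, (hlowzero x h1 h2).2]; simp [pvInd]),
          pvSum_zero L pvHi _ (fun x h1 h2 => by rw [(hhighzero x h1 h2).1, (hhighzero x h1 h2).2]; simp [pvInd])]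
        rw [pvSum_congr c L _ _ (fun x h1 _ => by rw [(hmid x h1).1, (hmid x h1).2])]
        ring
      show (0 + pvSum c L _, 0 + pvSum c L _) = (I, U)
      rw [zero_add, zero_add, hIeq, hUeq]
  rw [hA, hB]

-- ===== VERDICT (by name: the statement is the Claim_ definition above) =====
theorem overlap_spans_spec : Claim_equal_overlap_spans := by
  intro spans1 spans2 hdom
  exact overlap_spans_eq_alt spans1 spans2 hdom
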